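-- pv_equiv track=rewrite | github.com/server-mechanic/mechanic2 | src/python/mechanic2/__init__.py | _parseFollowUpCommand
-- ===== SOURCE A (Python) =====
-- def _parseFollowUpCommand(args):
--   followUpCommand = []
--   doubleDashSeen = False
--   for arg in args:
--     if not doubleDashSeen and arg == "--":
--       doubleDashSeen = True
--     elif doubleDashSeen:
--       followUpCommand.append(arg)
--   return followUpCommand
-- ===== SOURCE B (Python) =====
-- def _parseFollowUpCommand(args):
--   args = list(args)
--   if "--" in args:
--     return args[args.index("--") + 1:]
--   return []
-- ===== Notes on version B (the rewrite author's own statement) =====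
-- stated objective: simpler
-- what changed: The flag-tracking accumulation loop is replaced by a find-then-slice: locate the first "--" with index and return the suffix slice after it wholesale (or [] if absent).
import Mathlib
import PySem

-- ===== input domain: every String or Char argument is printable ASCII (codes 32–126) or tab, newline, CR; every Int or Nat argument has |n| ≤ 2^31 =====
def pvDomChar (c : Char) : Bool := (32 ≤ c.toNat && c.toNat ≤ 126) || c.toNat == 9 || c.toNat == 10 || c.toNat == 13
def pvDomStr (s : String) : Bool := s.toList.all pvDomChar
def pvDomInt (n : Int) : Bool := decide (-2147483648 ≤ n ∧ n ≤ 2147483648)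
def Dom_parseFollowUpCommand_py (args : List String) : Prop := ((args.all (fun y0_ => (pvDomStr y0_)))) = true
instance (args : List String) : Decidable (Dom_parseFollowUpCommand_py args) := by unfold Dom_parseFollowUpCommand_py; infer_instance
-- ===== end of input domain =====

-- B replaces A's flag-tracking accumulation loop by a find-then-slice (simpler decomposition, same cost).

-- ===== PORT A =====
-- loop state: (followUpCommand, doubleDashSeen)
def pvStepA (st : List String × Bool) (arg : String) : List String × Bool :=
  if !st.2 && arg == "--" then (st.1, true)
  else if st.2 then (st.1 ++ [arg], st.2)
  else st

def parseFollowUpCommand_py (args : List String) : List String :=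
  (args.foldl pvStepA ([], false)).1

-- ===== PORT B =====
def parseFollowUpCommand_py_alt (args : List String) : List String :=
  match PySem.List.index? args "--" with
  | some i => PySem.List.slice args (some ((i : Int) + 1)) none
  | none => []

-- ===== PRECONDITION & SPEC =====
def Spec_parseFollowUpCommand_py (args : List String) (out : List String) : Prop := out = parseFollowUpCommand_py_alt args
instance (args : List String) (out : List String) : Decidable (Spec_parseFollowUpCommand_py args out) := by unfold Spec_parseFollowUpCommand_py; infer_instance

-- ===== CLAIM (what is proved, stated in full; the proofs are below) =====
def Claim_equal_parseFollowUpCommand_py : Prop := ∀ (args : List String), Dom_parseFollowUpCommand_py args → Spec_parseFollowUpCommand_py args (parseFollowUpCommand_py args)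

-- ===== LEMMAS AND PROOFS =====

-- once the flag is set, the loop appends every remaining element
theorem pvFoldA_true (args : List String) (acc : List String) :
    args.foldl pvStepA (acc, true) = (acc ++ args, true) := by
  induction args generalizing acc with
  | nil => simp
  | cons a t ih => simp [pvStepA, ih]

-- before the flag is set, the fold computes B's find-then-slice result
theorem pvFoldA_false (args : List String) :
    (args.foldl pvStepA ([], false)).1 = parseFollowUpCommand_py_alt args := by
  induction args with
  | nil => simp [parseFollowUpCommand_py_alt, PySem.List.index?]
  | cons a t ih =>
    by_cases h : a = "--"
    · subst h
      simp only [List.foldl_cons,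
        show pvStepA ([], false) "--" = ([], true) by rfl, pvFoldA_true]
      rw [parseFollowUpCommand_py_alt, PySem.List.index?_cons_self]
      norm_num [PySem.List.slice_from_one]
    · simp only [List.foldl_cons]
      rw [show pvStepA ([], false) a = ([], false) by simp [pvStepA, h]]
      rw [ih, parseFollowUpCommand_py_alt, parseFollowUpCommand_py_alt,
        PySem.List.index?_cons_of_ne t h]
      cases hidx : PySem.List.index? t "--" with
      | none => simp
      | some i =>
        simp only [Option.map_some]
        rw [show ((i : Int) + 1) = (((i + 1 : Nat)) : Int) by push_cast; ring,
          show (((i + 1) : Nat) : Int) + 1 = (((i + 2 : Nat)) : Int) by push_cast; ring,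
          PySem.List.slice_from_natCast, PySem.List.slice_from_natCast]
        simp

-- ===== VERDICT (by name: the statement is the Claim_ definition above) =====
theorem parseFollowUpCommand_py_spec : Claim_equal_parseFollowUpCommand_py := by
  intro args _
  unfold Spec_parseFollowUpCommand_py parseFollowUpCommand_py
  exact pvFoldA_false args
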